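-- pv_equiv track=rewrite | github.com/AMGavrilescu/Linguistica-Computazionale-Progetto-2019-20 | programma1.py | distr_hapax
-- ===== SOURCE A (Python) =====
-- from collections import Counter # conta l'occorrenza di un elemento
--
-- def distr_hapax(tok_list, index):
--     temp_list = []
--     nr_hapax = 0
--     for tok in range(0, index):
--         if tok < index:
--             temp_list.append(tok_list[tok])
--     dist_freq = Counter(temp_list).items() # calcolo la frequenza dei token
--     for i in dist_freq:
--         if i[1] ==  1: # se frequenza = 1, cioè é un hapax
--             nr_hapax += 1 # incremento contatore degli hapax
--     return nr_hapax
-- ===== SOURCE B (Python) =====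
-- def distr_hapax(tok_list, index):
--     counts = {}
--     nr_hapax = 0
--     for i in range(index):
--         tok = tok_list[i]
--         c = counts.get(tok)
--         if c is None:
--             counts[tok] = 1
--             nr_hapax += 1
--         else:
--             if c == 1:
--                 nr_hapax -= 1
--             counts[tok] = c + 1
--     return nr_hapax
-- ===== Notes on version B (the rewrite author's own statement) =====
-- stated objective: alternative
-- what changed: Replaces A's three passes (build a prefix copy list, build a Counter over it, scan the items view for frequency 1) with a single fused pass that maintains a running hapax counter alongside the counting dict, materializing no prefix list and no items view.
import Mathlib
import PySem

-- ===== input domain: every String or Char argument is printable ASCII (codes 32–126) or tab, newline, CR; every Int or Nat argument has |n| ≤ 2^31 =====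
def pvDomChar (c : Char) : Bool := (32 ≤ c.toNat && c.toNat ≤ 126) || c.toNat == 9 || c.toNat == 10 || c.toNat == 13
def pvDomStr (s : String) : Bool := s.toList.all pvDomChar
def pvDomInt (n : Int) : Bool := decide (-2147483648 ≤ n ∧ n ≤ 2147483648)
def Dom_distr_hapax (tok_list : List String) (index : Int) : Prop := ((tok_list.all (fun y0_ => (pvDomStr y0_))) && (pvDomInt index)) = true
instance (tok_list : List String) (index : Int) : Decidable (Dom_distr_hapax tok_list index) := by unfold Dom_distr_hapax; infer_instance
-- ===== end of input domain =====

-- B fuses A's two passes (build a Counter, then count items of frequency 1) into one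
-- pass that keeps a running hapax count next to the counting dict (objective: alternative).

-- ===== PORT A =====
def distr_hapax (tok_list : List String) (index : Int) : Int :=
  -- temp_list = []; for tok in range(0, index): if tok < index: temp_list.append(tok_list[tok])
  let temp_list :=
    (PySem.List.pyRange 0 index).foldl
      (fun acc tok =>
        if tok < index then acc ++ [PySem.List.pyGetD tok_list tok ""] else acc) []
  -- dist_freq = Counter(temp_list).items()
  let dist_freq := (PySem.Dict.counter temp_list).items
  -- for i in dist_freq: if i[1] == 1: nr_hapax += 1
  dist_freq.foldl (fun nr_hapax i => if i.2 == 1 then nr_hapax + 1 else nr_hapax) 0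

-- ===== PORT B =====
def distr_hapax_alt (tok_list : List String) (index : Int) : Int :=
  let st :=
    (PySem.List.pyRange 0 index).foldl
      (fun st i =>
        let tok := PySem.List.pyGetD tok_list i ""
        match st.1.get? tok with
        | none => (st.1.insert tok 1, st.2 + 1)
        | some c => (st.1.insert tok (c + 1), if c == 1 then st.2 - 1 else st.2))
      ((PySem.Dict.empty : PySem.Dict String Int), (0 : Int))
  st.2

-- ===== PRECONDITION & SPEC =====
-- Pre_ excludes index > len(tok_list), where both Pythons raise IndexError on tok_list[i].
def Pre_distr_hapax (tok_list : List String) (index : Int) : Prop :=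
  index ≤ (tok_list.length : Int)
instance (tok_list : List String) (index : Int) : Decidable (Pre_distr_hapax tok_list index) := by
  unfold Pre_distr_hapax; infer_instance

def pvWitness_distr_hapax : List String × Int := (["a", "b", "a"], 3)

def Spec_distr_hapax (tok_list : List String) (index : Int) (out : Int) : Prop := out = distr_hapax_alt tok_list index
instance (tok_list : List String) (index : Int) (out : Int) : Decidable (Spec_distr_hapax tok_list index out) := by unfold Spec_distr_hapax; infer_instance

-- ===== CLAIM (what is proved, stated in full; the proofs are below) =====
def Claim_equal_distr_hapax : Prop := ∀ (tok_list : List String) (index : Int), Dom_distr_hapax tok_list index → Pre_distr_hapax tok_list index → Spec_distr_hapax tok_list index (distr_hapax tok_list index)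

-- ===== LEMMAS AND PROOFS =====

-- The common prefix both loops read: map of pyGetD over the range is List.take.
theorem pv_map_prefix (tok_list : List String) (n : Nat) (h : n ≤ tok_list.length) :
    (PySem.List.pyRange 0 (n : Int)).map (fun j => PySem.List.pyGetD tok_list j "") =
      tok_list.take n := by
  have hlen : (tok_list.take n).length = n := by simp [List.length_take, Nat.min_eq_left h]
  have base := PySem.List.map_pyGetD_pyRange_zero (tok_list.take n) ""
  have hlen' : PySem.List.len (tok_list.take n) = (n : Int) := by
    show ((tok_list.take n).length : Int) = (n : Int)
    exact_mod_cast hlen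
  rw [hlen'] at base
  rw [← base]
  apply List.map_congr_left
  intro j hj
  rw [PySem.List.mem_pyRange_one] at hj
  have hj1 : j < ((tok_list.take n).length : Int) := by omega
  have hj2 : j < (tok_list.length : Int) := by omega
  rw [PySem.List.pyGetD_eq_getElem _ _ hj.1 hj2, PySem.List.pyGetD_eq_getElem _ _ hj.1 hj1]
  rw [List.getElem_take]

-- B's one-pass step over the token list (the range fold after foldl_map).
def pvStep (st : PySem.Dict String Int × Int) (tok : String) : PySem.Dict String Int × Int :=
  match st.1.get? tok with
  | none => (st.1.insert tok 1, st.2 + 1)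
  | some c => (st.1.insert tok (c + 1), if c == 1 then st.2 - 1 else st.2)

-- count-with-one-element-toggled, on a Nodup list
theorem pv_countP_toggle {x : String} (p q : String → Bool) :
    ∀ (S : List String), S.Nodup → x ∈ S → (∀ k ∈ S, k ≠ x → p k = q k) →
      ((S.countP q : Int)) = (S.countP p : Int) + (if q x then 1 else 0) - (if p x then 1 else 0) := by
  intro S
  induction S with
  | nil => intro _ hx; simp at hx
  | cons a S ih =>
    intro hnd hx hagree
    rcases List.mem_cons.mp hx with rfl | hxS
    · have hnot : x ∉ S := (List.nodup_cons.mp hnd).1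
      have heq : S.countP p = S.countP q := by
        apply List.countP_congr
        intro k hk
        rw [hagree k (List.mem_cons_of_mem _ hk) (fun h => hnot (h ▸ hk))]
      simp only [List.countP_cons, heq]
      by_cases hq : q x <;> by_cases hp : p x <;> simp [hq, hp]
    · have hax : a ≠ x := fun h => (List.nodup_cons.mp hnd).1 (h ▸ hxS)
      have hpa : p a = q a := hagree a List.mem_cons_self hax
      have := ih (List.nodup_cons.mp hnd).2 hxS
        (fun k hk hkx => hagree k (List.mem_cons_of_mem _ hk) hkx)
      simp only [List.countP_cons, hpa]
      by_cases hqa : q a <;> simp [hqa] <;> omega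

-- keys of the insert-counting fold from empty are the distinct tokens
theorem pv_keys_fold (l : List String) :
    (l.foldl (fun d x => d.insert x (d.getD x 0 + 1)) (PySem.Dict.empty : PySem.Dict String Int)).keys
      = PySem.Set.ofList l := by
  rw [PySem.Dict.keys_foldl_insert]
  simp [PySem.Dict.keys_empty, PySem.Set.ofList, PySem.Set.update]

theorem pv_contains_fold (l : List String) (x : String) :
    ((l.foldl (fun d x => d.insert x (d.getD x 0 + 1)) (PySem.Dict.empty : PySem.Dict String Int)).contains x = true)
      ↔ x ∈ l := by
  rw [PySem.Dict.contains_iff_mem_keys, pv_keys_fold, PySem.Set.mem_ofList]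

-- the invariant: B's pass computes (the counting dict, hapax count of the prefix)
theorem pv_invariant : ∀ (l : List String),
    l.foldl pvStep ((PySem.Dict.empty : PySem.Dict String Int), (0 : Int)) =
      (l.foldl (fun d x => d.insert x (d.getD x 0 + 1)) PySem.Dict.empty,
       ((PySem.Set.ofList l).countP (fun k => l.count k == 1) : Int)) := by
  intro l
  induction l using List.reverseRecOn with
  | nil => rfl
  | append_singleton l x ih =>
    rw [List.foldl_append, List.foldl_append, ih]
    simp only [List.foldl_cons, List.foldl_nil]
    set C := l.foldl (fun d x => d.insert x (d.getD x 0 + 1)) (PySem.Dict.empty : PySem.Dict String Int) with hC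
    have hgetD : ∀ v, C.getD v 0 = (l.count v : Int) := by
      intro v
      rw [hC, PySem.Dict.getD_foldl_insert_add_one]
      simp [PySem.Dict.getD_empty]
    by_cases hx : x ∈ l
    · -- x already seen: get? = some (count x l)
      have hcontains : C.contains x = true := (pv_contains_fold l x).mpr hx
      have hget : C.get? x = some ((l.count x : Nat) : Int) := by
        have h1 : C.getD x 0 = (l.count x : Int) := hgetD x
        rw [PySem.Dict.getD_eq_get?_getD] at h1
        rcases h : C.get? x with _ | c
        · rw [PySem.Dict.get?_eq_none_iff_contains] at h
          rw [h] at hcontains; exact absurd hcontains (by simp)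
        · rw [h] at h1; simp at h1; rw [h1]
      simp only [pvStep, hget]
      have hcount_pos : 1 ≤ l.count x := List.count_pos_iff.mpr hx
      have hset : PySem.Set.ofList (l ++ [x]) = PySem.Set.ofList l := by
        rw [PySem.Set.ofList_append]
        simp only [PySem.Set.update, List.foldl_cons, List.foldl_nil]
        exact PySem.Set.add_of_mem ((PySem.Set.mem_ofList l x).mpr hx)
      have hcount_app : ∀ k, (l ++ [x]).count k = l.count k + (if x = k then 1 else 0) := by
        intro k
        rw [List.count_append]
        by_cases hk : x = k <;> simp [hk]
      rw [Prod.mk.injEq]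
      refine ⟨?_, ?_⟩
      · congr 1
        rw [hgetD x]
      · rw [hset]
        have htoggle := pv_countP_toggle
          (x := x)
          (fun k => l.count k == 1) (fun k => (l ++ [x]).count k == 1)
          (PySem.Set.ofList l) (PySem.Set.nodup_ofList l)
          ((PySem.Set.mem_ofList l x).mpr hx)
          (by
            intro k _ hkx
            show (List.count k l == 1) = (List.count k (l ++ [x]) == 1)
            rw [hcount_app k]
            simp [Ne.symm hkx])
        rw [htoggle]
        have hqx : List.count x (l ++ [x]) = List.count x l + 1 := by
          rw [hcount_app x]; simp
        by_cases hc1 : List.count x l = 1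
        · simp [hc1, hqx]
        · have h2 : (((List.count x l : Nat) : Int) == 1) = false := by simp; omega
          simp only [hqx, h2]
          simp [hc1]
          omega
    · -- x fresh: get? = none
      have hcontains : C.contains x = false := by
        rcases h : C.contains x with _ | _
        · rfl
        · exact absurd ((pv_contains_fold l x).mp h) hx
      have hget : C.get? x = none := (PySem.Dict.get?_eq_none_iff_contains C x).mpr hcontains
      simp only [pvStep, hget]
      have hcount0 : l.count x = 0 := List.count_eq_zero.mpr hx
      have hset : PySem.Set.ofList (l ++ [x]) = PySem.Set.ofList l ++ [x] := by
        rw [PySem.Set.ofList_append]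
        simp only [PySem.Set.update, List.foldl_cons, List.foldl_nil]
        exact PySem.Set.add_of_not_mem (fun h => hx ((PySem.Set.mem_ofList l x).mp h))
      rw [Prod.mk.injEq]
      refine ⟨?_, ?_⟩
      · congr 1
        rw [hgetD x, hcount0]
        simp
      · rw [hset, List.countP_append]
        have h1 : (PySem.Set.ofList l).countP (fun k => (l ++ [x]).count k == 1)
            = (PySem.Set.ofList l).countP (fun k => l.count k == 1) := by
          apply List.countP_congr
          intro k hk
          have hkx : x ≠ k := by
            intro h; subst h; exact hx ((PySem.Set.mem_ofList l _).mp hk)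
          rw [List.count_append]
          simp [hkx]
        have h2 : List.countP (fun k => (l ++ [x]).count k == 1) [x] = 1 := by
          simp [List.count_append, hcount0, List.count_singleton]
        rw [h1, h2]
        push_cast
        ring

-- ===== VERDICT (by name: the statement is the Claim_ definition above) =====
theorem distr_hapax_spec : Claim_equal_distr_hapax := by
  intro tok_list index _ hpre
  unfold Spec_distr_hapax distr_hapax distr_hapax_alt
  by_cases hneg : index ≤ 0
  · have hnil : PySem.List.pyRange 0 index = [] := by
      simp [PySem.List.pyRange]; omega
    rw [hnil]
    rfl
  · unfold Pre_distr_hapax at hpre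
    set n : Nat := index.toNat with hn
    have hidx : index = (n : Int) := by omega
    have hnle : n ≤ tok_list.length := by omega
    set temp := tok_list.take n with htemp
    -- A's first loop builds temp
    have hfilter : (PySem.List.pyRange 0 index).filter (fun tok => decide (tok < index))
        = PySem.List.pyRange 0 index := by
      apply List.filter_eq_self.mpr
      intro a ha
      rw [PySem.List.mem_pyRange_one] at ha
      simp; omega
    have hA1 : (PySem.List.pyRange 0 index).foldl
        (fun acc tok => if tok < index then acc ++ [PySem.List.pyGetD tok_list tok ""] else acc) []
        = temp := by
      have := PySem.List.foldl_append_if (fun tok => decide (tok < index))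
        (fun tok => PySem.List.pyGetD tok_list tok "") (PySem.List.pyRange 0 index) []
      simp only [decide_eq_true_eq] at this
      rw [this, hfilter, List.nil_append, hidx, pv_map_prefix tok_list n hnle]
    -- B's loop is the fold of pvStep over temp
    have hB1 : (PySem.List.pyRange 0 index).foldl
        (fun st i =>
          let tok := PySem.List.pyGetD tok_list i ""
          match st.1.get? tok with
          | none => (st.1.insert tok 1, st.2 + 1)
          | some c => (st.1.insert tok (c + 1), if c == 1 then st.2 - 1 else st.2))
        ((PySem.Dict.empty : PySem.Dict String Int), (0 : Int))
        = temp.foldl pvStep ((PySem.Dict.empty : PySem.Dict String Int), (0 : Int)) := by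
      rw [hidx, htemp, ← pv_map_prefix tok_list n hnle, List.foldl_map]
      rfl
    rw [hA1, hB1, pv_invariant temp]
    -- A's second loop counts frequency-1 items of Counter(temp)
    rw [PySem.List.foldl_count_if (fun i => i.2 == 1) ((PySem.Dict.counter temp).items) 0,
      PySem.Dict.items_counter temp]
    rw [List.countP_map]
    have : ((fun (i : String × Int) => i.2 == 1) ∘ fun k => (k, (temp.count k : Int)))
        = fun k => ((temp.count k : Int) == 1) := rfl
    rw [this]
    have hpred : (PySem.Set.ofList temp).countP (fun k => ((temp.count k : Int) == 1))
        = (PySem.Set.ofList temp).countP (fun k => temp.count k == 1) := by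
      apply List.countP_congr
      intro k _
      simp
    rw [hpred]
    ring
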